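-- pv_equiv track=rewrite | github.com/borisbolsh/PyFunTasks | 2.7_FindShortestWords.py | findShortestWords
-- ===== SOURCE A (Python) =====
-- def findShortestWords(words):
--     minlen = len(words[0])
--     for word in words:
--         if len(word) < minlen:
--             minlen = len(word)
--     ans = []
--     for word in words:
--         if len(word) == minlen:
--             ans.append(word)
--     return ' '.join(ans)
-- ===== SOURCE B (Python) =====
-- def findShortestWords(words):
--     minlen = len(words[0])
--     ans = []
--     for word in words:
--         l = len(word)
--         if l < minlen:
--             minlen = l
--             ans = [word]
--         elif l == minlen:
--             ans.append(word)
--     return ' '.join(ans)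
-- ===== Notes on version B (the rewrite author's own statement) =====
-- stated objective: simpler
-- what changed: Fuses A's two passes (first find the minimum length, then filter) into one pass that resets the answer list whenever a strictly smaller length appears.
import Mathlib
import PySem

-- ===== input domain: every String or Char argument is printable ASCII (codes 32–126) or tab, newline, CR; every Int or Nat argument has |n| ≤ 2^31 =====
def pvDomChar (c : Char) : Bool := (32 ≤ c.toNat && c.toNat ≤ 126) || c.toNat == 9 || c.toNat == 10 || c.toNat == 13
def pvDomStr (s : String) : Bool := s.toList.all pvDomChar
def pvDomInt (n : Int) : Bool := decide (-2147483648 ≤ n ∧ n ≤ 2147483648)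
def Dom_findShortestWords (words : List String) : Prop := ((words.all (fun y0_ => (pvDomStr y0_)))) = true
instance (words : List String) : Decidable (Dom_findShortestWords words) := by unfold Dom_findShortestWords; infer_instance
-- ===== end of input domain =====

-- B fuses A's two passes (min pass then filter pass) into one pass resetting the answer on a new minimum; return value only.
-- ===== PORT A =====
def findShortestWords (words : List String) : String :=
  match words with
  | [] => ""   -- Python raises IndexError on words[0]; excluded by Pre_
  | w0 :: _ =>
    let minlen := words.foldl (fun m w => if PySem.Str.len w < m then PySem.Str.len w else m) (PySem.Str.len w0)
    let ans := words.foldl (fun acc w => if PySem.Str.len w = minlen then acc ++ [w] else acc) ([] : List String)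
    PySem.Str.join " " ans

-- ===== PORT B =====
def findShortestWords_alt (words : List String) : String :=
  match words with
  | [] => ""   -- len(words[0]) raises IndexError; excluded by Pre_
  | w0 :: _ =>
    let st := words.foldl (fun (s : Int × List String) w =>
        let l := PySem.Str.len w
        if l < s.1 then (l, [w])
        else if l = s.1 then (s.1, s.2 ++ [w])
        else s) (PySem.Str.len w0, ([] : List String))
    PySem.Str.join " " st.2

-- ===== PRECONDITION & SPEC =====
-- Pre_ excludes exactly the empty list, on which both Pythons raise IndexError at words[0].
def Pre_findShortestWords (words : List String) : Prop := words ≠ []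
instance (words : List String) : Decidable (Pre_findShortestWords words) := by unfold Pre_findShortestWords; infer_instance
def pvWitness_findShortestWords : List String := ["ab", "c", "de"]

def Spec_findShortestWords (words : List String) (out : String) : Prop := out = findShortestWords_alt words
instance (words : List String) (out : String) : Decidable (Spec_findShortestWords words out) := by unfold Spec_findShortestWords; infer_instance

-- ===== CLAIM =====
def Claim_equal_findShortestWords : Prop := ∀ (words : List String), Dom_findShortestWords words → Pre_findShortestWords words → Spec_findShortestWords words (findShortestWords words)

-- ===== LEMMAS AND PROOFS =====

-- the running minimum never increases
theorem foldlMin_le (ws : List String) (m : Int) :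
    ws.foldl (fun m w => if PySem.Str.len w < m then PySem.Str.len w else m) m ≤ m := by
  induction ws generalizing m with
  | nil => simp
  | cons w ws ih =>
      simp only [List.foldl_cons]
      split_ifs with h
      · exact le_trans (ih _) (le_of_lt h)
      · exact ih m

-- B's fused fold = (final minimum, kept prefix ++ filter of the tail by the final minimum)
theorem fused_fold (ws : List String) (m : Int) (acc : List String) :
    ws.foldl (fun (s : Int × List String) w =>
        let l := PySem.Str.len w
        if l < s.1 then (l, [w])
        else if l = s.1 then (s.1, s.2 ++ [w])
        else s) (m, acc)
    = (ws.foldl (fun m w => if PySem.Str.len w < m then PySem.Str.len w else m) m,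
       (if ws.foldl (fun m w => if PySem.Str.len w < m then PySem.Str.len w else m) m < m then []
        else acc)
       ++ ws.filter (fun w => PySem.Str.len w
            = ws.foldl (fun m w => if PySem.Str.len w < m then PySem.Str.len w else m) m)) := by
  induction ws generalizing m acc with
  | nil => simp
  | cons w ws ih =>
      simp only [List.foldl_cons, List.filter_cons, decide_eq_true_eq]
      by_cases h1 : PySem.Str.len w < m
      · simp only [if_pos h1]
        rw [ih]
        set M := ws.foldl (fun m w => if PySem.Str.len w < m then PySem.Str.len w else m)
          (PySem.Str.len w) with hM
        have hle : M ≤ PySem.Str.len w := foldlMin_le ws (PySem.Str.len w)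
        by_cases h2 : M < PySem.Str.len w
        · rw [if_pos h2, if_pos (lt_trans h2 h1), if_neg (by omega : ¬ PySem.Str.len w = M)]
        · rw [if_neg h2, if_pos (by omega : M < m), if_pos (by omega : PySem.Str.len w = M)]
          simp
      · simp only [if_neg h1]
        by_cases h2 : PySem.Str.len w = m
        · simp only [if_pos h2]
          rw [ih]
          set M := ws.foldl (fun m w => if PySem.Str.len w < m then PySem.Str.len w else m) m with hM
          have hle : M ≤ m := foldlMin_le ws m
          by_cases h3 : M < m
          · rw [if_pos h3, if_pos h3, if_neg (by omega : ¬ PySem.Str.len w = M)]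
          · rw [if_neg h3, if_neg h3, if_pos (by omega : PySem.Str.len w = M)]
            simp
        · simp only [if_neg h2]
          rw [ih]
          set M := ws.foldl (fun m w => if PySem.Str.len w < m then PySem.Str.len w else m) m with hM
          have hle : M ≤ m := foldlMin_le ws m
          rw [if_neg (by omega : ¬ PySem.Str.len w = M)]

-- ===== VERDICT =====
theorem findShortestWords_spec : Claim_equal_findShortestWords := by
  intro words _ hpre
  unfold Spec_findShortestWords findShortestWords findShortestWords_alt
  match words with
  | [] => exact absurd rfl hpre
  | w0 :: ws =>
      simp only [fused_fold, ite_self]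
      refine congrArg (PySem.Str.join " ") ?_
      have h := PySem.List.foldl_append_if
        (fun w => decide (PySem.Str.len w =
          (w0 :: ws).foldl (fun m w => if PySem.Str.len w < m then PySem.Str.len w else m)
            (PySem.Str.len w0)))
        (fun w => w) (w0 :: ws) []
      simpa using h
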